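-- pv_equiv track=rewrite | github.com/janina9395/advent_of_code2019 | day_8/day_8.py | render_image
-- ===== SOURCE A (Python) =====
-- import enum
--
-- class Colors(enum.Enum):
--     Black = 0
--     White = 1
--     Transparent = 2
--
-- def render_image(decoded_image, width):
--     result = ""
--     for i in range(0, len(decoded_image)):
--         if int(decoded_image[i]) == Colors.Black.value:
--             result += " "
--         elif int(decoded_image[i]) == Colors.White.value:
--             result += "#"
--         if (i + 1) % width == 0:
--             result += "\n"
--
--     return result
-- ===== SOURCE B (Python) =====
-- def render_image(decoded_image, width):
--     pix = {0: " ", 1: "#"}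
--     parts = []
--     rest = decoded_image
--     while rest:
--         row, rest = rest[:width], rest[width:]
--         parts.append("".join(pix.get(int(p), "") for p in row))
--         if len(row) == width:
--             parts.append("\n")
--     return "".join(parts)
-- ===== Notes on version B (the rewrite author's own statement) =====
-- stated objective: faster
-- what changed: B chunks the image into rows of width pixels by slicing and joins per-row renderings (newline appended exactly on full rows) instead of A's per-pixel string append with a modulo test at every index; Pre_ restricts to positive width, the natural domain of a row width, excluding width==0 (A raises ZeroDivisionError on nonempty input, returns '' on empty) and negative widths, where A's value is an accident of Python's sign-following modulo and B's row loop does not terminate.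
-- outside the precondition, e.g. on render_image([0, 1], -1): A returns ' \n#\n', B does not finish within the time limit; on render_image([], 0): A returns '', B returns ''
import Mathlib
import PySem

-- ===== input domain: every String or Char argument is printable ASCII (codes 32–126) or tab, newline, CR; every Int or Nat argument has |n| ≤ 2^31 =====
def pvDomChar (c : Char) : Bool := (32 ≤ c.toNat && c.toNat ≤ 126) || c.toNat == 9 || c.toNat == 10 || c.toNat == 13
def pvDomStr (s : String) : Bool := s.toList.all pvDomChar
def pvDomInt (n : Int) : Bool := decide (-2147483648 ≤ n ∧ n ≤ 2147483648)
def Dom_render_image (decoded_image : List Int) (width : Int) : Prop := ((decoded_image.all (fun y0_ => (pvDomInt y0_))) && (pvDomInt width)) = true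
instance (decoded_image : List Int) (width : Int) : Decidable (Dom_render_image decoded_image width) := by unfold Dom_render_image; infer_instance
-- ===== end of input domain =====

-- B renders the image by chunking it into rows of width pixels (slice + join, newline on full rows)
-- instead of A's per-pixel append-and-modulo loop; Pre_ restricts to positive widths (the natural
-- domain of a row width): width == 0 raises in A, and negative widths are excluded as unnatural.


-- ===== PORT A =====
-- strings are built as List Char (result += "x" is list append) and wrapped with String.ofList at the end
def render_image (decoded_image : List Int) (width : Int) : String :=
  String.ofList ((PySem.List.pyRange 0 (decoded_image.length : Int) 1).foldl
    (fun result i =>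
      let result :=
        if PySem.List.pyGetD decoded_image i 0 = 0 then result ++ [' ']
        else if PySem.List.pyGetD decoded_image i 0 = 1 then result ++ ['#']
        else result
      if PySem.Int.mod (i + 1) width = 0 then result ++ ['\n'] else result) [])

-- ===== PORT B =====
-- {0: " ", 1: "#"}.get(int(p), "") for a pixel p (a two-entry literal dict, ported as the two-case test)
def pixChar (p : Int) : List Char := if p = 0 then [' '] else if p = 1 then ['#'] else []

-- the while-loop of Source B: rest[:width] / rest[width:] become take/drop of the Nat row width
-- (exact for the positive widths Pre_ admits); newline only on full rows
def rowsB (w : Nat) (rest : List Int) : List Char :=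
  match rest with
  | [] => []
  | x :: xs =>
    if _h : w = 0 then []   -- totality guard only: under Pre_ the loop is entered only with w ≠ 0
    else
      let row := (x :: xs).take w
      row.flatMap pixChar ++ (if row.length = w then ['\n'] else []) ++ rowsB w ((x :: xs).drop w)
termination_by rest.length
decreasing_by simp; omega

def render_image_alt (decoded_image : List Int) (width : Int) : String :=
  String.ofList (rowsB width.toNat decoded_image)

-- ===== PRECONDITION & SPEC =====
-- Pre_ restricts to positive width, the natural domain of a row width: width == 0 raises
-- ZeroDivisionError in A on nonempty input (and returns '' on empty input), and for negative
-- widths A's value is an accident of Python's sign-following modulo while B's row loop diverges.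
def Pre_render_image (decoded_image : List Int) (width : Int) : Prop :=
  1 ≤ width
instance (decoded_image : List Int) (width : Int) : Decidable (Pre_render_image decoded_image width) := by unfold Pre_render_image; infer_instance

def pvWitness_render_image : List Int × Int := ([0, 1, 2, 1, 0, 1], 2)

def Spec_render_image (decoded_image : List Int) (width : Int) (out : String) : Prop := out = render_image_alt decoded_image width
instance (decoded_image : List Int) (width : Int) (out : String) : Decidable (Spec_render_image decoded_image width out) := by unfold Spec_render_image; infer_instance

-- ===== CLAIM (what is proved, stated in full; the proofs are below) =====
def Claim_equal_render_image : Prop := ∀ (decoded_image : List Int) (width : Int), Dom_render_image decoded_image width → Pre_render_image decoded_image width → Spec_render_image decoded_image width (render_image decoded_image width)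

-- ===== LEMMAS AND PROOFS =====

-- the per-index piece A appends at index j
def gA (dl : List Int) (w : Nat) (j : Int) : List Char :=
  pixChar (PySem.List.pyGetD dl j 0) ++ (if (w : Int) ∣ (j + 1) then ['\n'] else [])

lemma A_flat (dl : List Int) (width : Int) (hw : 0 < width) :
    render_image dl width
      = String.ofList ((PySem.List.pyRange 0 (dl.length : Int) 1).flatMap (gA dl width.toNat)) := by
  unfold render_image
  congr 1
  have hfun : (fun (result : List Char) i =>
      let result :=
        if PySem.List.pyGetD dl i 0 = 0 then result ++ [' ']
        else if PySem.List.pyGetD dl i 0 = 1 then result ++ ['#']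
        else result
      if PySem.Int.mod (i + 1) width = 0 then result ++ ['\n'] else result)
      = fun (result : List Char) i => result ++ gA dl width.toNat i := by
    funext r i
    have hmod : (PySem.Int.mod (i + 1) width = 0) ↔ ((width.toNat : Int) ∣ (i + 1)) := by
      rw [PySem.Int.mod_eq_zero_iff_dvd, Int.toNat_of_nonneg hw.le]
    simp only [gA, pixChar]
    split_ifs with h1 h2 h3 h4 h5 h6 h7 <;>
      simp_all
  rw [hfun, PySem.List.foldl_append_eq_flatMap]
  simp

-- indices [0, m) read off the first m elements
lemma map_getD_range_take (dl : List Int) (m : Nat) (hm : m ≤ dl.length) :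
    (PySem.List.pyRange 0 (m : Int) 1).map (fun j => PySem.List.pyGetD dl j 0) = dl.take m := by
  induction m with
  | zero => simp
  | succ k ih =>
    have hk : k ≤ dl.length := by omega
    have : ((k + 1 : Nat) : Int) = (k : Int) + 1 := by push_cast; ring
    rw [this, PySem.List.pyRange_one_succ_right (by positivity)]
    rw [List.map_append, ih hk]
    have hlt : k < dl.length := by omega
    rw [List.take_succ_eq_append_getElem hlt]
    simp only [List.map_cons, List.map_nil, PySem.List.pyGetD_natCast]
    rw [List.getD_eq_getElem?_getD, List.getElem?_eq_getElem hlt]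
    rfl

-- main: A's per-index flatMap equals B's row recursion
lemma main_eq (w : Nat) (hw : 0 < w) (dl : List Int) :
    (PySem.List.pyRange 0 (dl.length : Int) 1).flatMap (gA dl w) = rowsB w dl := by
  induction hn : dl.length using Nat.strong_induction_on generalizing dl with
  | _ n ih =>
    match dl, hn with
    | [], hn =>
      simp at hn; subst hn
      rw [PySem.List.pyRange_one_eq_nil (by norm_num)]
      simp [rowsB]
    | x :: xs, hn =>
      subst hn
      have hne : w ≠ 0 := by omega
      rw [rowsB, dif_neg hne]
      set dl := x :: xs with hdl
      have hlen0 : 0 < dl.length := by simp [hdl]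
      by_cases hcase : dl.length < w
      · -- partial final row: no index gets a newline
        have hcongr : ∀ j ∈ PySem.List.pyRange 0 (dl.length : Int) 1,
            gA dl w j = pixChar (PySem.List.pyGetD dl j 0) := by
          intro j hj
          rw [PySem.List.mem_pyRange_one] at hj
          have hnd : ¬ ((w : Int) ∣ (j + 1)) := by
            intro hd
            have := Int.le_of_dvd (by omega) hd
            omega
          simp [gA, hnd]
        rw [List.flatMap_congr hcongr]
        have : (PySem.List.pyRange 0 (dl.length : Int) 1).flatMap
            (fun j => pixChar (PySem.List.pyGetD dl j 0))
            = ((PySem.List.pyRange 0 (dl.length : Int) 1).map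
                (fun j => PySem.List.pyGetD dl j 0)).flatMap pixChar := by
          rw [List.flatMap_map]
        rw [this, map_getD_range_take dl dl.length le_rfl, List.take_length]
        rw [List.take_of_length_le (by omega), List.drop_eq_nil_of_le (by omega), rowsB]
        simp [show ¬ dl.length = w by omega]
      · -- at least one full row
        rw [not_lt] at hcase
        obtain ⟨v, rfl⟩ : ∃ v, w = v + 1 := ⟨w - 1, by omega⟩
        have hvlt : v < dl.length := by omega
        have hcast : ((v + 1 : Nat) : Int) = (v : Int) + 1 := by push_cast; ring
        rw [PySem.List.pyRange_one_append 0 ((v + 1 : Nat) : Int) (dl.length : Int)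
              (by positivity) (by exact_mod_cast hcase), List.flatMap_append]
        rw [hcast, PySem.List.pyRange_one_succ_right (by positivity), List.flatMap_append]
        -- indices [0, v): no newline
        have hcongr : ∀ j ∈ PySem.List.pyRange 0 (v : Int) 1,
            gA dl (v + 1) j = pixChar (PySem.List.pyGetD dl j 0) := by
          intro j hj
          rw [PySem.List.mem_pyRange_one] at hj
          have hnd : ¬ (((v : Int) + 1) ∣ (j + 1)) := by
            intro hd
            have := Int.le_of_dvd (by omega) hd
            omega
          simp [gA, hnd]
        rw [List.flatMap_congr hcongr]
        have h1 : (PySem.List.pyRange 0 (v : Int) 1).flatMap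
            (fun j => pixChar (PySem.List.pyGetD dl j 0))
            = (dl.take v).flatMap pixChar := by
          rw [← map_getD_range_take dl v (by omega), List.flatMap_map]
        rw [h1]
        -- index v: the newline
        have h2 : [(v : Int)].flatMap (gA dl (v + 1)) = pixChar dl[v] ++ ['\n'] := by
          have hd : ((v + 1 : Nat) : Int) ∣ ((v : Int) + 1) := by
            rw [hcast]
          simp only [List.flatMap_cons, List.flatMap_nil, gA]
          rw [if_pos hd]
          simp [PySem.List.pyGetD_natCast, List.getD_eq_getElem?_getD,
            List.getElem?_eq_getElem hvlt]
        rw [h2]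
        -- indices [v+1, len): the remaining rows, via the IH on dl.drop (v+1)
        have h3 : (PySem.List.pyRange ((v + 1 : Nat) : Int) (dl.length : Int) 1).flatMap
            (gA dl (v + 1)) = rowsB (v + 1) (dl.drop (v + 1)) := by
          have hih := ih (dl.length - (v + 1)) (by omega) (dl.drop (v + 1))
            (by simp)
          rw [← hih, PySem.List.pyRange_one, PySem.List.pyRange_one, List.flatMap_map,
            List.flatMap_map]
          have hm : List.range ((dl.length : Int) - ((v + 1 : Nat) : Int)).toNat
              = List.range (((dl.length - (v + 1) : Nat) : Int) - 0).toNat := by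
            congr 1; omega
          rw [hm]
          apply List.flatMap_congr
          intro k hk
          rw [List.mem_range] at hk
          show gA dl (v + 1) (((v + 1 : Nat) : Int) + (k : Int))
             = gA (dl.drop (v + 1)) (v + 1) (0 + (k : Int))
          have e1 : ((v + 1 : Nat) : Int) + (k : Int) = (((v + 1 + k : Nat)) : Int) := by
            push_cast; ring
          have e2 : (0 : Int) + (k : Int) = ((k : Nat) : Int) := by ring
          rw [e1, e2]
          unfold gA
          rw [PySem.List.pyGetD_natCast, PySem.List.pyGetD_natCast]
          have eget : dl.getD (v + 1 + k) 0 = (dl.drop (v + 1)).getD k 0 := by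
            simp [List.getD_eq_getElem?_getD, List.getElem?_drop]
          rw [eget]
          have edvd : (((v + 1 : Nat) : Int) ∣ (((v + 1 + k : Nat) : Int) + 1))
              ↔ (((v + 1 : Nat) : Int) ∣ (((k : Nat) : Int) + 1)) := by
            have : (((v + 1 + k : Nat) : Int) + 1) = ((v + 1 : Nat) : Int) + (((k : Nat) : Int) + 1) := by
              push_cast; ring
            rw [this, Int.dvd_add_right dvd_rfl]
          rw [if_congr edvd rfl rfl]
        rw [hcast] at h3
        rw [h3]
        -- B's row is full here
        simp [hvlt]
        rw [List.take_succ_eq_append_getElem hvlt, List.flatMap_append]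
        simp

-- ===== VERDICT (by name: the statement is the Claim_ definition above) =====
theorem render_image_spec : Claim_equal_render_image := by
  intro dl width _hdom hpre
  unfold Spec_render_image
  have hw : 0 < width := hpre
  rw [A_flat dl width hw, main_eq width.toNat (by omega) dl]
  rfl
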